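-- pv_equiv track=rewrite | github.com/nicoacevedor/C2_Problem_based_learning | format_text.py | justify_line
-- ===== SOURCE A (Python) =====
-- def justify_line(line: str, max_width: int) -> str:
--     """
--     Función que llena una línea con espacios hasta alcanzar el máximo
--
--     Inputs:
--     -------
--     line: str
--         Línea que se quiere justificar
--     max_width: int
--         Máximo tamaño de la línea
--
--     Output:
--     -------
--     str:
--         Línea justificada hasta el máximo
--     """
--     # si la línea ya ocupa el máximo, se termina
--     if len(line) == max_width:
--         return line
--     words = line.split(' ')
--     # si solo hay una palabra, también se termina
--     # porque no hay espacios extra que agregar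
--     if len(words) == 1:
--         return line
--     # se calcula el espacio extra restante y su distribución
--     # entre las palabras
--     free_space = max_width - len(line)
--     n_spaces = len(words) - 1
--     extra_space = free_space % n_spaces
--     space_width = (free_space // n_spaces) + 1
--     # si es divisible perfectamente, solo se reparten los espacios
--     if extra_space == 0:
--         return (space_width*' ').join(words)
--     # si no lo es, los espacios extra que quedan se reparten desde el inicio
--     output_text = ''
--     for i in range(n_spaces):
--         # cuando se acaba el espacio extra, se termina
--         if not extra_space:
--             end_of_line = (space_width*' ').join(words[i:])
--             return output_text + end_of_line
--         # si queda espacio, se agrega uno a cada espacio entre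
--         # las palabras desde el inicio
--         output_text += words[i] + (space_width + 1)*' '
--         extra_space -= 1
-- ===== SOURCE B (Python) =====
-- def justify_line(line: str, max_width: int) -> str:
--     # table-driven: one gap-width table, one assembly pass (no separate uniform/extra branches)
--     if len(line) == max_width:
--         return line
--     words = line.split(' ')
--     if len(words) == 1:
--         return line
--     free_space = max_width - len(line)
--     n_spaces = len(words) - 1
--     extra_space = free_space % n_spaces
--     space_width = free_space // n_spaces + 1
--     gaps = [space_width + 1] * extra_space + [space_width] * (n_spaces - extra_space)
--     parts = [words[0]]
--     for gap, word in zip(gaps, words[1:]):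
--         parts.append(' ' * gap)
--         parts.append(word)
--     return ''.join(parts)
-- ===== Notes on version B (the rewrite author's own statement) =====
-- stated objective: simpler
-- what changed: Replaces A's two separate assembly branches (uniform-gap join vs. a prefix-building loop followed by a join of the remaining words) with one gap-width table ([space_width+1]*extra + [space_width]*rest) consumed in a single zip pass.
import Mathlib
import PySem

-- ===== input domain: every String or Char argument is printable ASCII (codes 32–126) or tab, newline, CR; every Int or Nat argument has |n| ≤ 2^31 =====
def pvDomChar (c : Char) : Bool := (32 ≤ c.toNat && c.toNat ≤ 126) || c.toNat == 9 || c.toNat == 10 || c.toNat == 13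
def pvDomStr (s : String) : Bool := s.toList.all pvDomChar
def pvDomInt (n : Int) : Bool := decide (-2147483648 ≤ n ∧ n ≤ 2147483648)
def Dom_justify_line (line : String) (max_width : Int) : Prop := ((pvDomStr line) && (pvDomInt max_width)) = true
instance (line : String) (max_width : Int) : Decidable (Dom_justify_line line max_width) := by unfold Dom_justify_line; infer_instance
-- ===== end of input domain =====

-- B replaces A's two assembly branches (uniform join vs. prefix loop + join of the rest) by one
-- gap-width table and a single zip pass — objective: simpler decomposition, same cost.

-- ===== PORT A =====
-- Python "n * ' '" (empty for n ≤ 0; exact via pyRepeat)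
def pySpacesA (n : Int) : List Char := PySem.List.pyRepeat [' '] n

-- the 'for i in range(n_spaces)' loop of A, over the remaining range list
def justifyLoopA (words : List (List Char)) (space_width : Int) (rng : List Int)
    (extra_space : Int) (output_text : List Char) : List Char :=
  match rng with
  | [] => output_text -- unreachable: the Python loop always returns inside (extra_space < n_spaces)
  | i :: rest =>
    if extra_space = 0 then
      output_text ++ PySem.Chars.join (pySpacesA space_width) (PySem.List.slice words (some i) none)
    else
      justifyLoopA words space_width rest (extra_space - 1)
        -- words[i]: in range for every reached i (i < n_spaces < len(words)), so getD never fires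
        (output_text ++ ((PySem.List.pyGet? words i).getD []) ++ pySpacesA (space_width + 1))

def justify_line (line : String) (max_width : Int) : String :=
  if PySem.Str.len line = max_width then line
  else
    let words := PySem.Chars.splitOn line.toList [' ']
    if words.length = 1 then line
    else
      let free_space := max_width - PySem.Str.len line
      let n_spaces : Int := (words.length : Int) - 1
      let extra_space := PySem.Int.mod free_space n_spaces
      let space_width := PySem.Int.floordiv free_space n_spaces + 1
      if extra_space = 0 then
        String.ofList (PySem.Chars.join (pySpacesA space_width) words)
      else
        String.ofList (justifyLoopA words space_width (PySem.List.pyRange 0 n_spaces 1) extra_space [])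

-- ===== PORT B =====
def justify_line_alt (line : String) (max_width : Int) : String :=
  if PySem.Str.len line = max_width then line
  else
    let words := PySem.Chars.splitOn line.toList [' ']
    if words.length = 1 then line
    else
      let free_space := max_width - PySem.Str.len line
      let n_spaces : Int := (words.length : Int) - 1
      let extra_space := PySem.Int.mod free_space n_spaces
      let space_width := PySem.Int.floordiv free_space n_spaces + 1
      let gaps := List.replicate extra_space.toNat (space_width + 1)
                  ++ List.replicate (n_spaces - extra_space).toNat space_width
      match words with
      | [] => line -- unreachable: split always yields at least one word
      | w0 :: ws =>
        -- parts = [words[0]]; for gap, word in zip(gaps, words[1:]): append ' '*gap, word; ''.join(parts)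
        String.ofList ((gaps.zip ws).foldl
          (fun acc gw => acc ++ List.replicate gw.1.toNat ' ' ++ gw.2) w0)

-- ===== PRECONDITION & SPEC =====
def Spec_justify_line (line : String) (max_width : Int) (out : String) : Prop := out = justify_line_alt line max_width
instance (line : String) (max_width : Int) (out : String) : Decidable (Spec_justify_line line max_width out) := by unfold Spec_justify_line; infer_instance

-- ===== CLAIM (what is proved, stated in full; the proofs are below) =====
def Claim_equal_justify_line : Prop := ∀ (line : String) (max_width : Int), Dom_justify_line line max_width → Spec_justify_line line max_width (justify_line line max_width)

-- ===== LEMMAS AND PROOFS =====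

-- split(' ') never returns []
theorem splitOn_go_ne_nil (sep : List Char) :
    ∀ (fuel : Nat) (l cur : List Char) (acc : List (List Char)),
      PySem.Chars.splitOn.go sep fuel l cur acc ≠ [] := by
  intro fuel
  induction fuel with
  | zero => intro l cur acc; simp [PySem.Chars.splitOn.go]
  | succ n ih =>
    intro l cur acc
    cases l with
    | nil => simp [PySem.Chars.splitOn.go]
    | cons c rest =>
      simp only [PySem.Chars.splitOn.go]
      split <;> apply ih

theorem splitOn_ne_nil (s sep : List Char) : PySem.Chars.splitOn s sep ≠ [] :=
  splitOn_go_ne_nil sep _ s [] []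

-- the common normal form of both assemblies: the text after the first word,
-- with e gaps of width sw+1 followed by gaps of width sw
def tailJ (sw : Int) : Nat → List (List Char) → List Char
  | _, [] => []
  | 0, w :: rest => List.replicate sw.toNat ' ' ++ w ++ tailJ sw 0 rest
  | e + 1, w :: rest => List.replicate (sw + 1).toNat ' ' ++ w ++ tailJ sw e rest

theorem join_eq_tailJ (sw : Int) :
    ∀ (ws : List (List Char)) (w0 : List Char),
      PySem.Chars.join (List.replicate sw.toNat ' ') (w0 :: ws) = w0 ++ tailJ sw 0 ws := by
  intro ws
  induction ws with
  | nil => intro w0; simp [PySem.Chars.join_singleton, tailJ]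
  | cons w rest ih =>
    intro w0
    rw [PySem.Chars.join_cons_cons, ih w, tailJ]
    simp

theorem foldB_eq_tailJ (sw : Int) :
    ∀ (ws : List (List Char)) (e : Nat) (acc : List Char), e ≤ ws.length →
      ((List.replicate e (sw + 1) ++ List.replicate (ws.length - e) sw).zip ws).foldl
        (fun acc gw => acc ++ List.replicate gw.1.toNat ' ' ++ gw.2) acc
      = acc ++ tailJ sw e ws := by
  intro ws
  induction ws with
  | nil => intro e acc _; simp [tailJ]
  | cons w rest ih =>
    intro e acc he
    cases e with
    | zero =>
      have : (w :: rest).length - 0 = rest.length + 1 := by simp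
      rw [this, List.replicate_succ]
      simp only [List.replicate_zero, List.nil_append, List.zip_cons_cons, List.foldl_cons]
      have h0 : (List.replicate rest.length sw : List Int)
          = List.replicate 0 (sw + 1) ++ List.replicate (rest.length - 0) sw := by simp
      rw [h0, ih 0 _ (by omega), tailJ]
      simp
    | succ e' =>
      simp only [List.replicate_succ, List.cons_append, List.zip_cons_cons, List.foldl_cons]
      have hl : (w :: rest).length - (e' + 1) = rest.length - e' := by simp
      rw [hl, ih e' _ (by simpa using he), tailJ]
      simp

theorem loopA_eq_tailJ (sw : Int) (ws : List (List Char)) :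
    ∀ (e i : Nat), i + e + 1 < ws.length → ∀ (out : List Char),
      justifyLoopA ws sw (PySem.List.pyRange (i : Int) ((ws.length : Int) - 1) 1) (e : Int) out
      = out ++ ws.getD i [] ++ tailJ sw e (ws.drop (i + 1)) := by
  intro e
  induction e with
  | zero =>
    intro i hi out
    have hlt : (i : Int) < (ws.length : Int) - 1 := by push_cast; omega
    rw [PySem.List.pyRange_one_cons hlt]
    simp only [justifyLoopA]
    have hi' : i < ws.length := by omega
    rw [PySem.List.slice_from_natCast, List.drop_eq_getElem_cons hi']
    rw [show pySpacesA sw = List.replicate sw.toNat ' ' from PySem.List.pyRepeat_singleton ' ' sw]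
    rw [join_eq_tailJ]
    simp [List.getD_eq_getElem?_getD, hi']
  | succ e' ih =>
    intro i hi out
    have hlt : (i : Int) < (ws.length : Int) - 1 := by push_cast; omega
    rw [PySem.List.pyRange_one_cons hlt]
    simp only [justifyLoopA]
    rw [if_neg (by push_cast; omega)]
    have harg : ((e' + 1 : Nat) : Int) - 1 = (e' : Nat) := by omega
    have hstep : ((i : Int) + 1) = ((i + 1 : Nat) : Int) := by push_cast; ring
    rw [harg, hstep, ih (i + 1) (by omega)]
    have hi1 : i + 1 < ws.length := by omega
    have hi' : i < ws.length := by omega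
    rw [List.drop_eq_getElem_cons hi1, tailJ]
    rw [show pySpacesA (sw + 1) = List.replicate (sw + 1).toNat ' '
        from PySem.List.pyRepeat_singleton ' ' (sw + 1)]
    simp [PySem.List.pyGet?, PySem.List.pyIdx?, List.getD_eq_getElem?_getD, hi', hi1]

-- the arithmetic core: A's two assembly branches equal B's single table-driven pass
theorem branch_eq (w0 : List Char) (ws : List (List Char)) (sw e : Int)
    (he0 : 0 ≤ e) (helt : e < ((w0 :: ws).length : Int) - 1) :
    (if e = 0 then
        String.ofList (PySem.Chars.join (pySpacesA sw) (w0 :: ws))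
      else
        String.ofList (justifyLoopA (w0 :: ws) sw
          (PySem.List.pyRange 0 (((w0 :: ws).length : Int) - 1) 1) e []))
    = String.ofList (((List.replicate e.toNat (sw + 1)
          ++ List.replicate ((((w0 :: ws).length : Int) - 1) - e).toNat sw).zip ws).foldl
        (fun acc gw => acc ++ List.replicate gw.1.toNat ' ' ++ gw.2) w0) := by
  have hlen : ((w0 :: ws).length : Int) - 1 = (ws.length : Int) := by
    simp only [List.length_cons]; push_cast; omega
  have heN : (e.toNat : Int) = e := Int.toNat_of_nonneg he0
  by_cases h3 : e = 0
  · rw [if_pos h3, h3]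
    rw [show pySpacesA sw = List.replicate sw.toNat ' ' from PySem.List.pyRepeat_singleton ' ' sw]
    rw [join_eq_tailJ]
    have hgap : List.replicate (0 : Int).toNat (sw + 1)
        ++ List.replicate ((((w0 :: ws).length : Int) - 1) - 0).toNat sw
        = List.replicate 0 (sw + 1) ++ List.replicate (ws.length - 0) sw := by
      rw [hlen]; simp
    rw [hgap, foldB_eq_tailJ sw ws 0 w0 (by omega)]
  · rw [if_neg h3]
    have helt' : e < (ws.length : Int) := by rw [hlen] at helt; exact helt
    have hcond : 0 + e.toNat + 1 < (w0 :: ws).length := by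
      simp only [List.length_cons]; omega
    have hloop := loopA_eq_tailJ sw (w0 :: ws) e.toNat 0 hcond []
    rw [Nat.cast_zero, heN] at hloop
    rw [hloop]
    have hgap : List.replicate e.toNat (sw + 1)
        ++ List.replicate ((((w0 :: ws).length : Int) - 1) - e).toNat sw
        = List.replicate e.toNat (sw + 1) ++ List.replicate (ws.length - e.toNat) sw := by
      rw [hlen]; congr 1; congr 1; omega
    rw [hgap, foldB_eq_tailJ sw ws e.toNat w0 (by omega)]
    simp

-- ===== VERDICT (by name: the statement is the Claim_ definition above) =====
theorem justify_line_spec : Claim_equal_justify_line := by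
  unfold Claim_equal_justify_line
  intro line max_width _
  unfold Spec_justify_line justify_line justify_line_alt
  rcases hsp : PySem.Chars.splitOn line.toList [' '] with _ | ⟨w0, ws⟩
  · exact absurd hsp (splitOn_ne_nil _ _)
  · by_cases h1 : PySem.Str.len line = max_width
    · rw [if_pos h1, if_pos h1]
    · rw [if_neg h1, if_neg h1]
      by_cases h2 : (w0 :: ws).length = 1
      · rw [if_pos h2, if_pos h2]
      · rw [if_neg h2, if_neg h2]
        have hN : 2 ≤ (w0 :: ws).length := by
          rcases ws with _ | _
          · simp at h2
          · simp
        have hnpos : (0 : Int) < ((w0 :: ws).length : Int) - 1 := by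
          omega
        exact branch_eq w0 ws
          (PySem.Int.floordiv (max_width - PySem.Str.len line) (((w0 :: ws).length : Int) - 1) + 1)
          (PySem.Int.mod (max_width - PySem.Str.len line) (((w0 :: ws).length : Int) - 1))
          (PySem.Int.mod_nonneg _ hnpos)
          (PySem.Int.mod_lt _ hnpos)
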